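-- pv_equiv track=rewrite | github.com/pypi-data/pypi-mirror-403 | packages/dwave-experimental/dwave_experimental-2026.1.23-py3-none-any.whl/dwave/experimental/automorphism/automorphism_composite.py | reduce_generator_by_node_set
-- ===== SOURCE A (Python) =====
-- def reduce_generator_by_node_set(generator_dict: dict, node_set: set):
--     """Restrict a generator to a closed subspace defined by node_set
--
--     Note that the returned generators will only be valid for some graph
--     in general if the node_set are fully connected.
--
--     Args:
--         generator_dict: An automorphism as a dictionary.
--         node_set: A set of variables (defining the subgraph).
--
--     Returns:
--         a generator restricted to the subspace defined by the node_set,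
--         or an empty dictionary if the node_set is not closed under the
--         generator.
--
--     .. note:: The generator keys need only specify a subset of
--         variables in the node_set. Variables not specified in the generator
--         (dictionary format) are assumed to map 1:1.
--
--     """
--
--     node_set = node_set.intersection(generator_dict)
--     if not node_set:
--         return {}
--     reduced_node_set = node_set.intersection(generator_dict[n] for n in node_set)
--     while reduced_node_set != node_set:
--         node_set = reduced_node_set
--         reduced_node_set = node_set.intersection(generator_dict[n] for n in node_set)
--     return {n: generator_dict[n] for n in node_set}
-- ===== SOURCE B (Python) =====
-- def reduce_generator_by_node_set(generator_dict: dict, node_set: set):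
--     """Kahn-style peeling: count in-set preimages of each node, then repeatedly
--     discard nodes whose preimage count is zero (no generator image lands on them)."""
--     alive = {n for n in node_set if n in generator_dict}
--     indeg = {}
--     for n in alive:
--         t = generator_dict[n]
--         if t in alive:
--             indeg[t] = indeg.get(t, 0) + 1
--     stack = [n for n in alive if indeg.get(n, 0) == 0]
--     while stack:
--         n = stack.pop()
--         if n not in alive:
--             continue
--         alive.remove(n)
--         t = generator_dict[n]
--         if t in alive:
--             c = indeg[t] - 1
--             indeg[t] = c
--             if c == 0:
--                 stack.append(t)
--     return {n: generator_dict[n] for n in alive}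
-- ===== Notes on version B (the rewrite author's own statement) =====
-- stated objective: alternative
-- what changed: A repeatedly intersects the node set with the image of its survivors until a fixpoint; B counts in-set preimages once and removes zero-preimage nodes with a Kahn-style worklist, updating the counts incrementally.
import Mathlib
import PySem

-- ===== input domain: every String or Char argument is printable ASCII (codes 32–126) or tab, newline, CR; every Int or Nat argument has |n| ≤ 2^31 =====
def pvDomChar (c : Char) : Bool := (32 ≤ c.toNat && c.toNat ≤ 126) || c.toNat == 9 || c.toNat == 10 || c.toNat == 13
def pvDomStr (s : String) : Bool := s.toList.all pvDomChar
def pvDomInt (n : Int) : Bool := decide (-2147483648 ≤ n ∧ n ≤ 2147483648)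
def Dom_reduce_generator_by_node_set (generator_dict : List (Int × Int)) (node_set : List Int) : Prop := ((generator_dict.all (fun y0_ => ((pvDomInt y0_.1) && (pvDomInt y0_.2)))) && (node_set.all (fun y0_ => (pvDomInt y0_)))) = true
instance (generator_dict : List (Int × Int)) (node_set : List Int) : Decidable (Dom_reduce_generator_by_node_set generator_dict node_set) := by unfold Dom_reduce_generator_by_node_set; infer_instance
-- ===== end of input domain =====

-- B replaces A's repeated-intersection fixpoint loop with Kahn-style worklist peeling on
-- incrementally maintained preimage counts; return values agree everywhere.
-- Python set/dict iteration order is not modelled: ports keep a deterministic list order,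
-- and A's set comparison `reduced != node_set` is ported as list equality, which coincides
-- with set equality here because each reduction is an order-preserving filter of a nodup list.

-- ===== PORT A =====
-- reduced = node_set ∩ {generator_dict[n] : n ∈ node_set}
def pyStepA (d : PySem.Dict Int Int) (S : List Int) : List Int :=
  PySem.Set.inter S (S.map (fun n => d.getD n 0))

-- the `while reduced_node_set != node_set` loop; fuel only makes the recursion structural
-- (each non-fixpoint step strictly shrinks the list, so S.length + 1 steps always suffice)
def pyWhileAF (d : PySem.Dict Int Int) : Nat → List Int → List Int
  | 0, S => S
  | fuel + 1, S =>
    let r := pyStepA d S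
    if r = S then S else pyWhileAF d fuel r

def pyWhileA (d : PySem.Dict Int Int) (S : List Int) : List Int :=
  pyWhileAF d (S.length + 1) S

def reduce_generator_by_node_set (generator_dict : List (Int × Int)) (node_set : List Int) : List (Int × Int) :=
  let d := PySem.Dict.ofList generator_dict
  let S0 := PySem.Set.inter (PySem.Set.ofList node_set) d.keys   -- node_set.intersection(generator_dict)
  if S0 = [] then []                                             -- if not node_set: return {}
  else (pyWhileA d S0).map (fun n => (n, d.getD n 0))            -- {n: generator_dict[n] for n in node_set}

-- ===== PORT B =====
-- the `while stack` peeling loop of Source B; stack is LIFO with head = top; fuel only makes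
-- the recursion structural (each iteration shrinks alive.length + stack.length)
def loopBF (d : PySem.Dict Int Int) : Nat → List Int → PySem.Dict Int Int → List Int → List Int
  | _, alive, _, [] => alive
  | 0, alive, _, _ :: _ => alive
  | fuel + 1, alive, indeg, n :: rest =>
    if alive.contains n then                                     -- if n not in alive: continue
      let alive' := alive.erase n                                -- alive.remove(n) (Set.remove? of a member = erase)
      let t := d.getD n 0
      if alive'.contains t then
        let c := indeg.getD t 0 - 1
        loopBF d fuel alive' (indeg.insert t c) (if c = 0 then t :: rest else rest)
      else loopBF d fuel alive' indeg rest
    else loopBF d fuel alive indeg rest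

def loopB (d : PySem.Dict Int Int) (alive : List Int) (indeg : PySem.Dict Int Int) (stack : List Int) : List Int :=
  loopBF d (alive.length + stack.length) alive indeg stack

def reduce_generator_by_node_set_alt (generator_dict : List (Int × Int)) (node_set : List Int) : List (Int × Int) :=
  let d := PySem.Dict.ofList generator_dict
  let alive0 := PySem.Set.inter (PySem.Set.ofList node_set) d.keys    -- {n for n in node_set if n in generator_dict}
  let indeg0 := alive0.foldl (fun m n =>
      if alive0.contains (d.getD n 0) then m.modify (d.getD n 0) 0 (· + 1) else m) PySem.Dict.empty
  let stack0 := (alive0.filter (fun n => indeg0.getD n 0 == 0)).reverse   -- append/pop() LIFO, head = top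
  (loopB d alive0 indeg0 stack0).map (fun n => (n, d.getD n 0))

-- ===== PRECONDITION & SPEC =====
def Spec_reduce_generator_by_node_set (generator_dict : List (Int × Int)) (node_set : List Int) (out : List (Int × Int)) : Prop := out = reduce_generator_by_node_set_alt generator_dict node_set
instance (generator_dict : List (Int × Int)) (node_set : List Int) (out : List (Int × Int)) : Decidable (Spec_reduce_generator_by_node_set generator_dict node_set out) := by unfold Spec_reduce_generator_by_node_set; infer_instance

-- ===== CLAIM (what is proved, stated in full; the proofs are below) =====
def Claim_equal_reduce_generator_by_node_set : Prop := ∀ (generator_dict : List (Int × Int)) (node_set : List Int), Dom_reduce_generator_by_node_set generator_dict node_set → Spec_reduce_generator_by_node_set generator_dict node_set (reduce_generator_by_node_set generator_dict node_set)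

-- ===== LEMMAS AND PROOFS =====

-- a subset closed under taking a preimage inside itself
def PvClosed (d : PySem.Dict Int Int) (X : List Int) : Prop := ∀ n ∈ X, ∃ m ∈ X, d.getD m 0 = n

lemma mem_pyStepA (d : PySem.Dict Int Int) (S : List Int) (n : Int) :
    n ∈ pyStepA d S ↔ n ∈ S ∧ ∃ m ∈ S, d.getD m 0 = n := by
  simp [pyStepA, PySem.Set.mem_inter, List.mem_map, eq_comm]

lemma pyStepA_sublist (d : PySem.Dict Int Int) (S : List Int) : (pyStepA d S).Sublist S :=
  List.filter_sublist

lemma pyWhileAF_sublist (d : PySem.Dict Int Int) :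
    ∀ (fuel : Nat) (S : List Int), (pyWhileAF d fuel S).Sublist S := by
  intro fuel
  induction fuel with
  | zero => intro S; exact List.Sublist.refl S
  | succ fuel ih =>
    intro S
    simp only [pyWhileAF]
    split
    · exact List.Sublist.refl S
    · exact (ih (pyStepA d S)).trans (pyStepA_sublist d S)

lemma pyWhileAF_closed (d : PySem.Dict Int Int) :
    ∀ (fuel : Nat) (S : List Int), S.length < fuel → PvClosed d (pyWhileAF d fuel S) := by
  intro fuel
  induction fuel with
  | zero => intro S h; omega
  | succ fuel ih =>
    intro S h
    simp only [pyWhileAF]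
    split
    · rename_i hfix
      intro n hn
      have : n ∈ pyStepA d S := by rw [hfix]; exact hn
      exact ((mem_pyStepA d S n).1 this).2
    · rename_i hfix
      refine ih (pyStepA d S) ?_
      have hsub : (pyStepA d S).Sublist S := pyStepA_sublist d S
      have hle := hsub.length_le
      have hne : (pyStepA d S).length ≠ S.length := fun he => hfix (hsub.eq_of_length he)
      omega

lemma pyWhileAF_greatest (d : PySem.Dict Int Int) :
    ∀ (fuel : Nat) (S : List Int) (X : List Int),
      PvClosed d X → (∀ x ∈ X, x ∈ S) → ∀ x ∈ X, x ∈ pyWhileAF d fuel S := by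
  intro fuel
  induction fuel with
  | zero => intro S X _ hXS; exact hXS
  | succ fuel ih =>
    intro S X hX hXS
    simp only [pyWhileAF]
    split
    · exact hXS
    · refine ih (pyStepA d S) X hX ?_
      intro x hx
      rcases hX x hx with ⟨m, hm, hgm⟩
      exact (mem_pyStepA d S x).2 ⟨hXS x hx, m, hXS m hm, hgm⟩

lemma pyWhileA_sublist (d : PySem.Dict Int Int) (S : List Int) : (pyWhileA d S).Sublist S :=
  pyWhileAF_sublist d (S.length + 1) S

lemma pyWhileA_closed (d : PySem.Dict Int Int) (S : List Int) : PvClosed d (pyWhileA d S) :=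
  pyWhileAF_closed d (S.length + 1) S (by omega)

lemma pyWhileA_greatest (d : PySem.Dict Int Int) (S : List Int) (X : List Int)
    (hX : PvClosed d X) (hXS : ∀ x ∈ X, x ∈ S) : ∀ x ∈ X, x ∈ pyWhileA d S :=
  pyWhileAF_greatest d (S.length + 1) S X hX hXS

lemma sublist_eq_of_nodup {l : List Int} (hl : l.Nodup) :
    ∀ {s t : List Int}, s.Sublist l → t.Sublist l → (∀ x, x ∈ s ↔ x ∈ t) → s = t := by
  induction l with
  | nil =>
    intro s t hs ht _
    rw [List.sublist_nil.1 hs, List.sublist_nil.1 ht]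
  | cons a l ih =>
    intro s t hs ht hmem
    have hal : a ∉ l := (List.nodup_cons.1 hl).1
    have hln : l.Nodup := (List.nodup_cons.1 hl).2
    cases hs with
    | cons _ hs' =>
      cases ht with
      | cons _ ht' => exact ih hln hs' ht' hmem
      | cons₂ _ ht' =>
        exfalso
        have : a ∈ s := (hmem a).2 List.mem_cons_self
        exact hal (hs'.mem this)
    | cons₂ _ hs' =>
      cases ht with
      | cons _ ht' =>
        exfalso
        have : a ∈ t := (hmem a).1 List.mem_cons_self
        exact hal (ht'.mem this)
      | cons₂ _ ht' =>
        have : _ = _ := ih hln hs' ht' (fun x => by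
          constructor
          · intro hx
            have := (hmem x).1 (List.mem_cons_of_mem a hx)
            rcases List.mem_cons.1 this with rfl | h
            · exact absurd (hs'.mem hx) hal
            · exact h
          · intro hx
            have := (hmem x).2 (List.mem_cons_of_mem a hx)
            rcases List.mem_cons.1 this with rfl | h
            · exact absurd (ht'.mem hx) hal
            · exact h)
        rw [this]

-- getD of the preimage-counting fold
lemma fold_indeg (d : PySem.Dict Int Int) (cond : Int → Bool) (t : Int) (hcond : cond t = true) :
    ∀ (l : List Int) (m : PySem.Dict Int Int),
      (l.foldl (fun m n => if cond (d.getD n 0) then m.modify (d.getD n 0) 0 (· + 1) else m) m).getD t 0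
        = m.getD t 0 + (l.countP (fun n => d.getD n 0 == t) : Int) := by
  intro l
  induction l with
  | nil => intro m; simp
  | cons n l ih =>
    intro m
    rw [List.foldl_cons, ih]
    rw [List.countP_cons]
    by_cases hg : d.getD n 0 = t
    · rw [hg, hcond]
      simp only [if_true, beq_self_eq_true]
      rw [PySem.Dict.getD_modify_self]
      push_cast
      omega
    · by_cases hc : cond (d.getD n 0) = true
      · rw [hc]
        simp only [if_true]
        rw [PySem.Dict.getD_modify]
        simp [hg, Ne.symm hg]
      · simp only [hc]
        simp [hg]

lemma loopBF_spec (d : PySem.Dict Int Int) (S0 : List Int) (hS : S0.Nodup) :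
    ∀ (fuel : Nat) (alive : List Int) (indeg : PySem.Dict Int Int) (stack : List Int),
    alive.length + stack.length ≤ fuel →
    alive.Sublist S0 →
    (∀ t ∈ alive, indeg.getD t 0 = (alive.countP (fun m => d.getD m 0 == t) : Int)) →
    (∀ t ∈ alive, indeg.getD t 0 = 0 → t ∈ stack) →
    (∀ X, PvClosed d X → (∀ x ∈ X, x ∈ alive) → ∀ s ∈ stack, s ∉ X) →
    (loopBF d fuel alive indeg stack).Sublist S0 ∧ PvClosed d (loopBF d fuel alive indeg stack) ∧
      (∀ X, PvClosed d X → (∀ x ∈ X, x ∈ alive) → ∀ x ∈ X, x ∈ loopBF d fuel alive indeg stack) := by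
  intro fuel
  induction fuel with
  | zero =>
    intro alive indeg stack hfuel hsub hcount hzero hX
    have ha : alive = [] := List.eq_nil_of_length_eq_zero (by omega)
    have hs : stack = [] := List.eq_nil_of_length_eq_zero (by omega)
    subst ha; subst hs
    exact ⟨List.nil_sublist S0, fun n hn => absurd hn List.not_mem_nil,
      fun X _ hXa x hx => absurd (hXa x hx) List.not_mem_nil⟩
  | succ fuel ih =>
    intro alive indeg stack hfuel hsub hcount hzero hX
    cases stack with
    | nil =>
      refine ⟨hsub, ?_, fun X _ hXa x hx => hXa x hx⟩
      intro n hn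
      by_cases h : ∃ m ∈ alive, d.getD m 0 = n
      · exact h
      · exfalso
        have hc0 : alive.countP (fun m => d.getD m 0 == n) = 0 := by
          rw [List.countP_eq_zero]
          intro m hm
          simp only [beq_iff_eq]
          exact fun he => h ⟨m, hm, he⟩
        have := hzero n hn (by rw [hcount n hn, hc0]; rfl)
        simp at this
    | cons n rest =>
      by_cases hcn : alive.contains n = true
      · have hnal : n ∈ alive := List.contains_iff_mem.1 hcn
        have hnodup : alive.Nodup := hsub.nodup hS
        have hperm : alive.Perm (n :: alive.erase n) := List.perm_cons_erase hnal
        have hmem' : ∀ x, x ∈ alive.erase n ↔ x ≠ n ∧ x ∈ alive := fun x => hnodup.mem_erase_iff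
        have hsub' : (alive.erase n).Sublist S0 := (List.erase_sublist).trans hsub
        have hlen' : (alive.erase n).length = alive.length - 1 := List.length_erase_of_mem hnal
        have hlen0 : 0 < alive.length := List.length_pos_of_mem hnal
        have hcnt : ∀ x, alive.countP (fun m => d.getD m 0 == x)
            = (if d.getD n 0 = x then 1 else 0) + (alive.erase n).countP (fun m => d.getD m 0 == x) := by
          intro x
          rw [hperm.countP_eq, List.countP_cons]
          by_cases h : d.getD n 0 = x <;> simp [h] <;> omega
        by_cases hct : (alive.erase n).contains (d.getD n 0) = true
        · -- remove n, decrement the counter of t = generator_dict[n], push t if it hit zero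
          have htal' : d.getD n 0 ∈ alive.erase n := List.contains_iff_mem.1 hct
          simp only [loopBF]
          rw [if_pos hcn, if_pos hct]
          set t := d.getD n 0 with ht
          set alive' := alive.erase n with halive'
          set c := indeg.getD t 0 - 1 with hc
          have hcount' : ∀ x ∈ alive', (indeg.insert t c).getD x 0
              = (alive'.countP (fun m => d.getD m 0 == x) : Int) := by
            intro x hx
            rw [PySem.Dict.getD_insert]
            have h1 := hcount x ((hmem' x).1 hx).2
            rw [hcnt x] at h1
            by_cases hxt : x = t
            · rw [if_pos hxt]
              rw [hxt] at h1
              rw [if_pos rfl] at h1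
              rw [hc, hxt]
              push_cast at h1 ⊢
              omega
            · rw [if_neg hxt]
              have hne : ¬ (d.getD n 0 = x) := fun h => hxt h.symm
              rw [if_neg hne] at h1
              simpa using h1
          have hzero' : ∀ x ∈ alive', (indeg.insert t c).getD x 0 = 0 →
              x ∈ (if c = 0 then t :: rest else rest) := by
            intro x hx hx0
            rw [PySem.Dict.getD_insert] at hx0
            by_cases hxt : x = t
            · rw [if_pos hxt] at hx0
              rw [if_pos hx0, hxt]
              exact List.mem_cons_self
            · rw [if_neg hxt] at hx0
              have hxr : x ∈ n :: rest := hzero x ((hmem' x).1 hx).2 hx0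
              have hxn : x ≠ n := ((hmem' x).1 hx).1
              have hxrest : x ∈ rest := by
                rcases List.mem_cons.1 hxr with h | h
                · exact absurd h hxn
                · exact h
              split <;> simp [hxrest]
          have hX' : ∀ X, PvClosed d X → (∀ x ∈ X, x ∈ alive') →
              ∀ s ∈ (if c = 0 then t :: rest else rest), s ∉ X := by
            intro X hXc hXa s hs hsX
            have hXa0 : ∀ x ∈ X, x ∈ alive := fun x hx => ((hmem' x).1 (hXa x hx)).2
            by_cases hst : s = t ∧ c = 0
            · rcases hXc s hsX with ⟨m, hmX, hgm⟩
              have hma' : m ∈ alive' := hXa m hmX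
              have hpos : 0 < alive'.countP (fun m => d.getD m 0 == s) := by
                rw [List.countP_pos_iff]
                exact ⟨m, hma', by simp [hgm]⟩
              have hc' := hcount' t htal'
              rw [PySem.Dict.getD_insert, if_pos rfl] at hc'
              rw [← hst.1] at hc'
              rw [hst.2] at hc'
              omega
            · have hsrest : s ∈ n :: rest := by
                by_cases hc0 : c = 0
                · rw [if_pos hc0] at hs
                  rcases List.mem_cons.1 hs with h | h
                  · exact absurd ⟨h, hc0⟩ hst
                  · exact List.mem_cons_of_mem n h
                · rw [if_neg hc0] at hs
                  exact List.mem_cons_of_mem n hs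
              exact hX X hXc hXa0 s hsrest hsX
          have hfuel' : alive'.length + (if c = 0 then t :: rest else rest).length ≤ fuel := by
            have : (if c = 0 then t :: rest else rest).length ≤ rest.length + 1 := by
              split <;> simp
            simp only [List.length_cons] at hfuel
            rw [halive', hlen']
            omega
          rcases ih alive' (indeg.insert t c) (if c = 0 then t :: rest else rest)
            hfuel' hsub' hcount' hzero' hX' with ⟨h1, h2, h3⟩
          refine ⟨h1, h2, ?_⟩
          intro X hXc hXa x hx
          have hnX : n ∉ X := hX X hXc hXa n List.mem_cons_self
          have hXa' : ∀ y ∈ X, y ∈ alive' := by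
            intro y hy
            exact (hmem' y).2 ⟨fun h => hnX (h ▸ hy), hXa y hy⟩
          exact h3 X hXc hXa' x hx
        · -- remove n, generator_dict[n] already gone: counters untouched
          have htal' : d.getD n 0 ∉ alive.erase n := fun h => hct (List.contains_iff_mem.2 h)
          simp only [loopBF]
          rw [if_pos hcn, if_neg hct]
          set alive' := alive.erase n with halive'
          have hcount' : ∀ x ∈ alive', indeg.getD x 0
              = (alive'.countP (fun m => d.getD m 0 == x) : Int) := by
            intro x hx
            have hxt : d.getD n 0 ≠ x := fun h => htal' (by rw [← h] at hx; exact hx)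
            have h1 := hcount x ((hmem' x).1 hx).2
            rw [hcnt x, if_neg hxt] at h1
            simpa using h1
          have hzero' : ∀ x ∈ alive', indeg.getD x 0 = 0 → x ∈ rest := by
            intro x hx hx0
            have hxr : x ∈ n :: rest := hzero x ((hmem' x).1 hx).2 hx0
            rcases List.mem_cons.1 hxr with h | h
            · exact absurd h ((hmem' x).1 hx).1
            · exact h
          have hX' : ∀ X, PvClosed d X → (∀ x ∈ X, x ∈ alive') → ∀ s ∈ rest, s ∉ X := by
            intro X hXc hXa s hs
            exact hX X hXc (fun x hx => ((hmem' x).1 (hXa x hx)).2) s (List.mem_cons_of_mem n hs)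
          have hfuel' : alive'.length + rest.length ≤ fuel := by
            simp only [List.length_cons] at hfuel
            rw [halive', hlen']
            omega
          rcases ih alive' indeg rest hfuel' hsub' hcount' hzero' hX' with ⟨h1, h2, h3⟩
          refine ⟨h1, h2, ?_⟩
          intro X hXc hXa x hx
          have hnX : n ∉ X := hX X hXc hXa n List.mem_cons_self
          exact h3 X hXc (fun y hy => (hmem' y).2 ⟨fun h => hnX (h ▸ hy), hXa y hy⟩) x hx
      · -- n no longer alive: skip it
        have hnal : n ∉ alive := fun h => hcn (List.contains_iff_mem.2 h)
        simp only [loopBF]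
        rw [if_neg hcn]
        have hzero' : ∀ x ∈ alive, indeg.getD x 0 = 0 → x ∈ rest := by
          intro x hx hx0
          rcases List.mem_cons.1 (hzero x hx hx0) with rfl | h
          · exact absurd hx hnal
          · exact h
        have hX' : ∀ X, PvClosed d X → (∀ x ∈ X, x ∈ alive) → ∀ s ∈ rest, s ∉ X := by
          intro X hXc hXa s hs
          exact hX X hXc hXa s (List.mem_cons_of_mem n hs)
        have hfuel' : alive.length + rest.length ≤ fuel := by
          simp only [List.length_cons] at hfuel
          omega
        exact ih alive indeg rest hfuel' hsub hcount hzero' hX'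

lemma loopB_spec (d : PySem.Dict Int Int) (S0 : List Int) (hS : S0.Nodup) :
    ∀ (alive : List Int) (indeg : PySem.Dict Int Int) (stack : List Int),
    alive.Sublist S0 →
    (∀ t ∈ alive, indeg.getD t 0 = (alive.countP (fun m => d.getD m 0 == t) : Int)) →
    (∀ t ∈ alive, indeg.getD t 0 = 0 → t ∈ stack) →
    (∀ X, PvClosed d X → (∀ x ∈ X, x ∈ alive) → ∀ s ∈ stack, s ∉ X) →
    (loopB d alive indeg stack).Sublist S0 ∧ PvClosed d (loopB d alive indeg stack) ∧
      (∀ X, PvClosed d X → (∀ x ∈ X, x ∈ alive) → ∀ x ∈ X, x ∈ loopB d alive indeg stack) :=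
  fun alive indeg stack =>
    loopBF_spec d S0 hS (alive.length + stack.length) alive indeg stack (Nat.le_refl _)

-- ===== VERDICT (by name: the statement is the Claim_ definition above) =====
theorem reduce_generator_by_node_set_spec : Claim_equal_reduce_generator_by_node_set := by
  intro gd ns _hDom
  unfold Spec_reduce_generator_by_node_set
  simp only [reduce_generator_by_node_set, reduce_generator_by_node_set_alt]
  set d := PySem.Dict.ofList gd with hd
  set S0 := PySem.Set.inter (PySem.Set.ofList ns) d.keys with hS0
  set indeg0 := S0.foldl (fun m n =>
      if S0.contains (d.getD n 0) then m.modify (d.getD n 0) 0 (· + 1) else m)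
      (PySem.Dict.empty : PySem.Dict Int Int) with hindeg0
  set stack0 := (S0.filter (fun n => indeg0.getD n 0 == 0)).reverse with hstack0
  have hnd : S0.Nodup := PySem.Set.nodup_inter _ _ (PySem.Set.nodup_ofList ns)
  have hfold : ∀ t ∈ S0, indeg0.getD t 0 = ((S0.countP (fun m => d.getD m 0 == t)) : Int) := by
    intro t ht
    have h1 := fold_indeg d (fun x => S0.contains x) t (List.contains_iff_mem.2 ht) S0 (PySem.Dict.empty : PySem.Dict Int Int)
    have h2 : PySem.Dict.empty.getD t (0 : Int) + ((S0.countP (fun m => d.getD m 0 == t)) : Int)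
        = ((S0.countP (fun m => d.getD m 0 == t)) : Int) := by
      rw [PySem.Dict.getD_empty]; omega
    rw [hindeg0]
    exact h1.trans h2
  have hzero : ∀ t ∈ S0, indeg0.getD t 0 = 0 → t ∈ stack0 := by
    intro t ht ht0
    rw [hstack0]
    simp [List.mem_reverse, List.mem_filter, ht, ht0]
  have hXinit : ∀ X, PvClosed d X → (∀ x ∈ X, x ∈ S0) → ∀ s ∈ stack0, s ∉ X := by
    intro X hXc hXa s hs hsX
    rw [hstack0] at hs
    simp only [List.mem_reverse, List.mem_filter, beq_iff_eq] at hs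
    rcases hXc s hsX with ⟨m, hmX, hgm⟩
    have hpos : 0 < S0.countP (fun m => d.getD m 0 == s) := by
      rw [List.countP_pos_iff]
      exact ⟨m, hXa m hmX, by simp [hgm]⟩
    have := hfold s hs.1
    rw [hs.2] at this
    omega
  have B := loopB_spec d S0 hnd S0 indeg0 stack0 (List.Sublist.refl _) hfold hzero hXinit
  have key : pyWhileA d S0 = loopB d S0 indeg0 stack0 := by
    refine sublist_eq_of_nodup hnd (pyWhileA_sublist d S0) B.1 ?_
    intro x
    constructor
    · intro hx
      exact B.2.2 (pyWhileA d S0) (pyWhileA_closed d S0) (fun y hy => (pyWhileA_sublist d S0).mem hy) x hx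
    · intro hx
      exact pyWhileA_greatest d S0 (loopB d S0 indeg0 stack0) B.2.1 (fun y hy => B.1.mem hy) x hx
  rw [← key]
  by_cases h0 : S0 = []
  · rw [h0]
    rfl
  · rw [if_neg h0]
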